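-- pv_equiv track=rewrite | github.com/vinchinzu/euler | python/354.py | get_ring_sizes
-- ===== SOURCE A (Python) =====
-- from typing import Dict, Iterable, List, Tuple
--
-- def hex_distance_squared(i: int, j: int) -> int:
--     """Return squared distance in axial coordinates on the hex grid.
--
--     The formula matches the Ruby implementation:
--     d^2 = 3*i^2 + 3*j^2 + 2*i*j.
--     """
--
--     return 3 * i * i + 3 * j * j + 2 * i * j
--
-- def get_ring_sizes(max_n: int) -> Dict[int, int]:
--     """Compute multiplicities of reachable squared distances up to max_n.
--
--     For each non-zero pair (i, j) with 0 <= i, j <= max_n, we: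
--     - compute d^2 via ``hex_distance_squared``
--     - add 6 to the count for that distance (accounting for hexagon symmetry)
--
--     This replicates the behavior of the Ruby draft, even though it is both
--     redundant and far too slow for very large ``max_n`` in practice.
--     """
--
--     ring_sizes: Dict[int, int] = {}
--     for i in range(max_n + 1):
--         for j in range(max_n + 1):
--             if i == 0 and j == 0:
--                 continue
--             d2 = hex_distance_squared(i, j)
--             if d2 > 0:
--                 ring_sizes[d2] = ring_sizes.get(d2, 0) + 6
--     return ring_sizes
-- ===== SOURCE B (Python) =====
-- def get_ring_sizes(max_n):
--     """Staged upper-triangle computation: the squared distance is symmetric in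
--     (i, j), so first materialise the list of pairs i <= j (skipping (0, 0)),
--     then tally them in one pass, weighting an off-diagonal pair doubly since
--     it stands for both orderings."""
--     pairs = [(i, j)
--              for i in range(max_n + 1)
--              for j in range(i, max_n + 1)
--              if (i, j) != (0, 0)]
--     ring_sizes = {}
--     for i, j in pairs:
--         d2 = 3 * i * i + 3 * j * j + 2 * i * j
--         ring_sizes[d2] = ring_sizes.get(d2, 0) + (6 if i == j else 12)
--     return ring_sizes
-- ===== Notes on version B (the rewrite author's own statement) =====
-- stated objective: alternative
-- what changed: B is a staged decomposition exploiting the symmetry of the squared-distance formula: it first materialises the list of upper-triangle index pairs (first index at most the second, skipping the origin pair), then tallies that list in one counting pass with a single weight on the diagonal and a doubled weight off it (an off-diagonal pair stands for both orderings), replacing A's nested loops over the full square and yielding the identical dict (same keys in first-occurrence order, same counts).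
import Mathlib
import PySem

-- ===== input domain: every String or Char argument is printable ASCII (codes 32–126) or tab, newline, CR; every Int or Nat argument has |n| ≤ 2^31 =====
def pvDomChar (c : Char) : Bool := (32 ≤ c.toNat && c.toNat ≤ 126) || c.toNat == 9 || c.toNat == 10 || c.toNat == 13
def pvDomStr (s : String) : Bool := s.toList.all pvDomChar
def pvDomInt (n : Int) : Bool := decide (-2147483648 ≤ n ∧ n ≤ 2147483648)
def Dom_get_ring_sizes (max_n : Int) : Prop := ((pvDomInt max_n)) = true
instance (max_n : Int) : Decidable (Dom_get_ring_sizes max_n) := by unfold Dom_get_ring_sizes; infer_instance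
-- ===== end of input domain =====

-- B stages the work: it first materialises the upper-triangle pair list (the squared distance
-- is symmetric), then tallies it in one counting pass with a doubled weight off the diagonal;
-- same dict, same key order, same counts as A.


-- ===== PORT A =====
def hex_distance_squared (i j : Int) : Int := 3 * i * i + 3 * j * j + 2 * i * j

def get_ring_sizes (max_n : Int) : List (Int × Int) :=
  (((PySem.List.pyRange 0 (max_n + 1) 1).foldl (fun d i =>
      (PySem.List.pyRange 0 (max_n + 1) 1).foldl (fun d j =>
        if i = 0 ∧ j = 0 then d
        else
          let d2 := hex_distance_squared i j
          if 0 < d2 then d.insert d2 (d.getD d2 0 + 6) else d) d)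
    (PySem.Dict.empty : PySem.Dict Int Int))).items

-- ===== PORT B =====
def get_ring_sizes_alt (max_n : Int) : List (Int × Int) :=
  let pairs : List (Int × Int) :=
    (PySem.List.pyRange 0 (max_n + 1) 1).flatMap (fun i =>
      ((PySem.List.pyRange i (max_n + 1) 1).filter (fun j => decide ¬(i = 0 ∧ j = 0))).map
        (fun j => (i, j)))
  (pairs.foldl (fun d p =>
      let d2 := 3 * p.1 * p.1 + 3 * p.2 * p.2 + 2 * p.1 * p.2
      d.insert d2 (d.getD d2 0 + (if p.1 = p.2 then 6 else 12)))
    (PySem.Dict.empty : PySem.Dict Int Int)).items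

-- ===== PRECONDITION & SPEC =====
def Spec_get_ring_sizes (max_n : Int) (out : List (Int × Int)) : Prop := out = get_ring_sizes_alt max_n
instance (max_n : Int) (out : List (Int × Int)) : Decidable (Spec_get_ring_sizes max_n out) := by unfold Spec_get_ring_sizes; infer_instance

-- ===== CLAIM (what is proved, stated in full; the proofs are below) =====
def Claim_equal_get_ring_sizes : Prop := ∀ (max_n : Int), Dom_get_ring_sizes max_n → Spec_get_ring_sizes max_n (get_ring_sizes max_n)

-- ===== LEMMAS AND PROOFS =====

-- the common counting step: d[k] = d.get(k, 0) + w for a (key, weight) pair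
def cstep (d : PySem.Dict Int Int) (p : Int × Int) : PySem.Dict Int Int :=
  d.insert p.1 (d.getD p.1 0 + p.2)

-- A's (key, weight) stream, row by row
def rowA (n i : Int) : List (Int × Int) :=
  ((PySem.List.pyRange 0 (n + 1) 1).filter (fun j => decide ¬(i = 0 ∧ j = 0))).map
    (fun j => (hex_distance_squared i j, 6))

def LA (n : Int) : List (Int × Int) := (PySem.List.pyRange 0 (n + 1) 1).flatMap (rowA n)

-- B's (key, weight) stream
def rowB (n i : Int) : List (Int × Int) :=
  ((PySem.List.pyRange i (n + 1) 1).filter (fun j => decide ¬(i = 0 ∧ j = 0))).map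
    (fun j => (hex_distance_squared i j, if i = j then 6 else 12))

def LB (n : Int) : List (Int × Int) := (PySem.List.pyRange 0 (n + 1) 1).flatMap (rowB n)

def wsum (L : List (Int × Int)) (k : Int) : Int :=
  ((L.filter (fun p => p.1 == k)).map Prod.snd).sum

-- positivity of the squared distance off (0,0) in the first quadrant
lemma hex_pos {i j : Int} (hi : 0 ≤ i) (hj : 0 ≤ j) (h : ¬(i = 0 ∧ j = 0)) :
    0 < hex_distance_squared i j := by
  have hident : hex_distance_squared i j = (i + j) ^ 2 + 2 * i ^ 2 + 2 * j ^ 2 := by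
    unfold hex_distance_squared; ring
  rcases Decidable.not_and_iff_or_not.mp h with hi0 | hj0
  · have : 0 < i := lt_of_le_of_ne hi (Ne.symm hi0)
    nlinarith
  · have : 0 < j := lt_of_le_of_ne hj (Ne.symm hj0)
    nlinarith

-- the two ports as counting folds over their (key, weight) streams
lemma portA_eq (n : Int) :
    get_ring_sizes n = ((LA n).foldl cstep PySem.Dict.empty).items := by
  unfold get_ring_sizes LA
  rw [List.foldl_flatMap]
  congr 1
  apply PySem.List.foldl_congr_mem
  intro d i hi
  have hi0 : 0 ≤ i := (PySem.List.mem_pyRange_one.mp hi).1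
  unfold rowA
  rw [List.foldl_map, ← PySem.List.foldl_ite_eq_foldl_filter (fun j => ¬(i = 0 ∧ j = 0))]
  apply PySem.List.foldl_congr_mem
  intro d j hj
  have hj0 : 0 ≤ j := (PySem.List.mem_pyRange_one.mp hj).1
  by_cases hc : i = 0 ∧ j = 0
  · simp [hc]
  · simp only [hc, not_false_iff, if_true]
    rw [if_pos (hex_pos hi0 hj0 hc)]
    rfl

lemma portB_eq (n : Int) :
    get_ring_sizes_alt n = ((LB n).foldl cstep PySem.Dict.empty).items := by
  have hLB : LB n = ((PySem.List.pyRange 0 (n + 1) 1).flatMap (fun i =>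
      ((PySem.List.pyRange i (n + 1) 1).filter (fun j => decide ¬(i = 0 ∧ j = 0))).map
        (fun j => (i, j)))).map
      (fun p => (hex_distance_squared p.1 p.2, if p.1 = p.2 then (6:Int) else 12)) := by
    unfold LB rowB
    rw [List.map_flatMap]
    congr 1
    funext i
    rw [List.map_map]
    rfl
  rw [hLB, List.foldl_map]
  rfl

-- running value of the counting fold
lemma getD_foldl_cstep (L : List (Int × Int)) (d : PySem.Dict Int Int) (k : Int) :
    (L.foldl cstep d).getD k 0 = d.getD k 0 + wsum L k := by
  induction L generalizing d with
  | nil => simp [wsum]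
  | cons p L ih =>
    rw [List.foldl_cons, ih]
    by_cases h : p.1 = k
    · subst h; simp [wsum, cstep, PySem.Dict.getD_insert_self]
      ring
    · simp [wsum, cstep, PySem.Dict.getD_insert, if_neg (Ne.symm h),
        show (p.1 == k) = false from beq_eq_false_iff_ne.mpr h]

-- items of the counting fold: first-occurrence keys paired with weight sums
lemma counterW_items (L : List (Int × Int)) :
    ((L.foldl cstep PySem.Dict.empty).items)
      = (PySem.Set.ofList (L.map Prod.fst)).map (fun k => (k, wsum L k)) := by
  have hkeys : (L.foldl cstep PySem.Dict.empty).keys = PySem.Set.ofList (L.map Prod.fst) := by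
    have := PySem.Dict.keys_foldl_insert_key (κ := Int) (ν := Int) L (Prod.fst)
      (fun d p => d.getD p.1 0 + p.2) PySem.Dict.empty
    simpa [cstep, PySem.Dict.keys_empty, PySem.Set.update_nil_left] using this
  have hnd : (L.foldl cstep PySem.Dict.empty).keys.Nodup := by
    rw [hkeys]; exact PySem.Set.nodup_ofList (xs := L.map Prod.fst)
  rw [PySem.Dict.items_eq_map_keys _ hnd 0, hkeys]
  exact List.map_congr_left (fun k _ => by rw [getD_foldl_cstep]; simp)

-- s.update(l) = s when l's elements are already in s
lemma update_eq_self_of_subset (s : PySem.Set Int) (l : List Int) (h : ∀ x ∈ l, x ∈ s) :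
    PySem.Set.update s l = s := by
  rw [PySem.Set.update_eq_append_filter]
  have : (PySem.Set.ofList l).filter (fun y => !(PySem.Set.contains s y)) = [] := by
    rw [List.filter_eq_nil_iff]
    intro y hy
    have hys : y ∈ s := h y ((PySem.Set.mem_ofList l y).mp hy)
    simp
    exact hys
  rw [this, List.append_nil]

lemma hex_symm (i j : Int) : hex_distance_squared i j = hex_distance_squared j i := by
  unfold hex_distance_squared; ring

-- A's per-row key stream
def rkA (n i : Int) : List Int :=
  ((PySem.List.pyRange 0 (n + 1) 1).filter (fun j => decide ¬(i = 0 ∧ j = 0))).map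
    (fun j => hex_distance_squared i j)

-- B's per-row key stream
def rkB (n i : Int) : List Int :=
  ((PySem.List.pyRange i (n + 1) 1).filter (fun j => decide ¬(i = 0 ∧ j = 0))).map
    (fun j => hex_distance_squared i j)

-- first m rows of A and of B introduce the same keys in the same order
lemma keys_aux (n : Int) (m : Nat) (hm : (m : Int) ≤ n + 1) :
    PySem.Set.ofList ((PySem.List.pyRange 0 (m : Int) 1).flatMap (rkA n))
      = PySem.Set.ofList ((PySem.List.pyRange 0 (m : Int) 1).flatMap (rkB n)) := by
  induction m with
  | zero => simp [PySem.List.pyRange_one_eq_nil (by omega : (0:Int) ≤ 0)]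
  | succ m ih =>
    have hm' : (m : Int) ≤ n + 1 := by push_cast at hm ⊢; omega
    have h0m : (0 : Int) ≤ (m : Int) := Int.natCast_nonneg m
    have hcast : ((m + 1 : Nat) : Int) = (m : Int) + 1 := by push_cast; ring
    rw [hcast, PySem.List.pyRange_one_succ_right h0m, List.flatMap_append,
      List.flatMap_append, PySem.Set.ofList_append, PySem.Set.ofList_append, ih hm']
    simp only [List.flatMap_cons, List.flatMap_nil, List.append_nil]
    have hsplit : rkA n (m : Int)
        = ((PySem.List.pyRange 0 (m : Int) 1).filter
            (fun j => decide ¬((m : Int) = 0 ∧ j = 0))).map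
              (fun j => hex_distance_squared (m : Int) j) ++ rkB n (m : Int) := by
      unfold rkA rkB
      rw [PySem.List.pyRange_one_append 0 (m : Int) (n + 1) h0m hm', List.filter_append,
        List.map_append]
    rw [hsplit, PySem.Set.update_append]
    congr 1
    apply update_eq_self_of_subset
    intro x hx
    obtain ⟨j, hj, rfl⟩ := List.mem_map.mp hx
    have hj' := List.mem_filter.mp hj
    have hjr := PySem.List.mem_pyRange_one.mp hj'.1
    apply (PySem.Set.mem_ofList _ _).mpr
    apply List.mem_flatMap.mpr
    refine ⟨j, PySem.List.mem_pyRange_one.mpr ⟨hjr.1, hjr.2⟩, ?_⟩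
    unfold rkB
    apply List.mem_map.mpr
    refine ⟨(m : Int), ?_, by rw [hex_symm]⟩
    apply List.mem_filter.mpr
    refine ⟨PySem.List.mem_pyRange_one.mpr ⟨le_of_lt hjr.2, by push_cast at hm ⊢; omega⟩, ?_⟩
    have hm0 : ¬((m : Int) = 0) := by omega
    simp
    right
    omega

-- equal first-occurrence key sets
lemma keys_LA_eq_LB (n : Int) :
    PySem.Set.ofList ((LA n).map Prod.fst) = PySem.Set.ofList ((LB n).map Prod.fst) := by
  have hA : (LA n).map Prod.fst = (PySem.List.pyRange 0 (n + 1) 1).flatMap (rkA n) := by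
    unfold LA
    rw [List.map_flatMap]
    congr 1
    funext a
    unfold rowA rkA
    rw [List.map_map]
    exact List.map_congr_left (fun j _ => rfl)
  have hB : (LB n).map Prod.fst = (PySem.List.pyRange 0 (n + 1) 1).flatMap (rkB n) := by
    unfold LB
    rw [List.map_flatMap]
    congr 1
    funext a
    unfold rowB rkB
    rw [List.map_map]
    exact List.map_congr_left (fun j _ => rfl)
  rw [hA, hB]
  by_cases h : 0 ≤ n + 1
  · have hc : (((n + 1).toNat : Nat) : Int) = n + 1 := Int.toNat_of_nonneg h
    have := keys_aux n (n + 1).toNat (by omega)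
    rwa [hc] at this
  · rw [PySem.List.pyRange_one_eq_nil (by omega : n + 1 ≤ 0)]
    rfl

-- weight sums over a filtered-and-keyed row
lemma wsum_filter_map (l : List Int) (p : Int → Bool) (key w : Int → Int) (k : Int) :
    wsum ((l.filter p).map (fun j => (key j, w j))) k
      = (l.map (fun j => if p j ∧ key j = k then w j else 0)).sum := by
  induction l with
  | nil => simp [wsum]
  | cons a l ih =>
    by_cases hp : p a
    · by_cases hk : key a = k
      · simp [hp, wsum, hk, ← ih]
      · simp [hp, wsum, hk, ← ih,
          show (key a == k) = false from beq_eq_false_iff_ne.mpr hk]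
    · simp [hp, ← ih]

lemma wsum_append (P Q : List (Int × Int)) (k : Int) :
    wsum (P ++ Q) k = wsum P k + wsum Q k := by
  simp [wsum]

lemma wsum_flatMap (l : List Int) (g : Int → List (Int × Int)) (k : Int) :
    wsum (l.flatMap g) k = (l.map (fun x => wsum (g x) k)).sum := by
  induction l with
  | nil => simp [wsum]
  | cons a l ih => simp [List.flatMap_cons, wsum_append, ih]

lemma pyRange_toFinset (a b : Int) :
    (PySem.List.pyRange a b 1).toFinset = Finset.Icc a (b - 1) := by
  ext x
  simp [PySem.List.mem_pyRange_one, Finset.mem_Icc]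


lemma sum_map_pyRange (a b : Int) (f : Int → Int) :
    ((PySem.List.pyRange a b 1).map f).sum = ∑ j ∈ Finset.Icc a (b - 1), f j := by
  rw [← pyRange_toFinset]
  exact (List.sum_toFinset f (PySem.List.nodup_pyRange_one a b)).symm

-- A's per-cell contribution to the weight sum at key k
def wA (k i j : Int) : Int :=
  if ¬(i = 0 ∧ j = 0) ∧ hex_distance_squared i j = k then (6 : Int) else 0

-- B's per-cell contribution
def wB (k i j : Int) : Int :=
  if ¬(i = 0 ∧ j = 0) ∧ hex_distance_squared i j = k then (if i = j then (6 : Int) else 12) else 0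

lemma wA_symm (k i j : Int) : wA k i j = wA k j i := by
  unfold wA
  rw [hex_symm]
  congr 1
  simp [and_comm]

lemma wsum_rowA (n i k : Int) :
    wsum (rowA n i) k = ∑ j ∈ Finset.Icc 0 n, wA k i j := by
  unfold rowA
  rw [wsum_filter_map, sum_map_pyRange]
  simp only [add_sub_cancel_right]
  exact Finset.sum_congr rfl (fun j _ => by unfold wA; simp only [decide_eq_true_eq])

lemma wsum_rowB (n i k : Int) :
    wsum (rowB n i) k = ∑ j ∈ Finset.Icc i n, wB k i j := by
  unfold rowB
  rw [wsum_filter_map, sum_map_pyRange]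
  simp only [add_sub_cancel_right]
  exact Finset.sum_congr rfl (fun j _ => by unfold wB; simp only [decide_eq_true_eq])

-- equal weight sums
lemma wsum_LA_eq_LB (n k : Int) : wsum (LA n) k = wsum (LB n) k := by
  unfold LA LB
  rw [wsum_flatMap, wsum_flatMap, sum_map_pyRange, sum_map_pyRange]
  simp only [add_sub_cancel_right]
  rw [Finset.sum_congr rfl (fun i _ => wsum_rowA n i k),
      Finset.sum_congr rfl (fun i _ => wsum_rowB n i k)]
  -- restrict B's inner sum to the common square
  have hB : ∀ i ∈ Finset.Icc (0:ℤ) n,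
      (∑ j ∈ Finset.Icc i n, wB k i j)
        = ∑ j ∈ Finset.Icc (0:ℤ) n, if i ≤ j then wB k i j else 0 := by
    intro i hi
    have h0 : (0:ℤ) ≤ i := (Finset.mem_Icc.mp hi).1
    have : Finset.Icc i n = (Finset.Icc (0:ℤ) n).filter (fun j => i ≤ j) := by
      ext x; simp [Finset.mem_Icc, Finset.mem_filter]; omega
    rw [this, Finset.sum_filter]
  rw [Finset.sum_congr rfl hB]
  -- split A's cell weight by the position of (i, j) relative to the diagonal
  have hsplit : ∀ i j : Int, wA k i j
      = (if i < j then wA k i j else 0) + (if i = j then wA k i j else 0)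
        + (if j < i then wA k i j else 0) := by
    intro i j
    rcases lt_trichotomy i j with h | h | h
    · simp [h, ne_of_lt h, not_lt_of_gt h]
    · simp [h]
    · simp [h, ne_of_gt h, not_lt_of_gt h]
  calc (∑ i ∈ Finset.Icc (0:ℤ) n, ∑ j ∈ Finset.Icc (0:ℤ) n, wA k i j)
      = ∑ i ∈ Finset.Icc (0:ℤ) n, ∑ j ∈ Finset.Icc (0:ℤ) n,
          ((if i < j then wA k i j else 0) + (if i = j then wA k i j else 0)
            + (if j < i then wA k i j else 0)) :=
        Finset.sum_congr rfl (fun i _ => Finset.sum_congr rfl (fun j _ => hsplit i j))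
    _ = (∑ i ∈ Finset.Icc (0:ℤ) n, ∑ j ∈ Finset.Icc (0:ℤ) n, (if i < j then wA k i j else 0))
        + (∑ i ∈ Finset.Icc (0:ℤ) n, ∑ j ∈ Finset.Icc (0:ℤ) n, (if i = j then wA k i j else 0))
        + (∑ i ∈ Finset.Icc (0:ℤ) n, ∑ j ∈ Finset.Icc (0:ℤ) n, (if j < i then wA k i j else 0)) := by
        simp [Finset.sum_add_distrib]
    _ = (∑ i ∈ Finset.Icc (0:ℤ) n, ∑ j ∈ Finset.Icc (0:ℤ) n, (if i < j then wA k i j else 0))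
        + (∑ i ∈ Finset.Icc (0:ℤ) n, ∑ j ∈ Finset.Icc (0:ℤ) n, (if i = j then wA k i j else 0))
        + (∑ i ∈ Finset.Icc (0:ℤ) n, ∑ j ∈ Finset.Icc (0:ℤ) n, (if i < j then wA k i j else 0)) := by
        congr 1
        rw [Finset.sum_comm]
        exact Finset.sum_congr rfl (fun i _ => Finset.sum_congr rfl
          (fun j _ => by rw [wA_symm]))
    _ = ∑ i ∈ Finset.Icc (0:ℤ) n, ∑ j ∈ Finset.Icc (0:ℤ) n, (if i ≤ j then wB k i j else 0) := by
        rw [← Finset.sum_add_distrib, ← Finset.sum_add_distrib]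
        refine Finset.sum_congr rfl (fun i _ => ?_)
        rw [← Finset.sum_add_distrib, ← Finset.sum_add_distrib]
        refine Finset.sum_congr rfl (fun j _ => ?_)
        unfold wA wB
        split_ifs <;> omega

-- ===== VERDICT (by name: the statement is the Claim_ definition above) =====
theorem get_ring_sizes_spec : Claim_equal_get_ring_sizes := by
  intro n _
  unfold Spec_get_ring_sizes
  rw [portA_eq, portB_eq, counterW_items, counterW_items, keys_LA_eq_LB]
  exact List.map_congr_left (fun k _ => by rw [wsum_LA_eq_LB])
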